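-- pv_equiv track=rewrite | github.com/ayoubarich-dev/Compressed_Audio | support.py | LZW_decode_bin
-- ===== SOURCE A (Python) =====
-- def LZW_decode_bin(code):
--     dict_LZW = []
--     seq = []
--     chr = {0:'0',1:'1'}
--
--     for elem in range(len(code) - 1):
--         c1 = chr[code[elem]] if code[elem] <= 1 else dict_LZW[code[elem] - 2]
--         if elem == 0 and code[elem + 1] > 1:
--             c2 = chr[code[elem]] if code[elem] <= 1 else dict_LZW[code[elem] - 2]
--         else:
--             if code[elem + 1] - 2 < len(dict_LZW) or code[elem + 1] <= 1:
--                 c2 = chr[code[elem + 1]] if code[elem + 1] <= 1 else dict_LZW[code[elem + 1] - 2]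
--             else:
--                 c2 = c1
--         seq.append(c1)
--         dict_LZW.append(c1 + c2[0])
--     seq.append(chr[code[-1]] if code[-1] <= 1 else dict_LZW[code[-1] - 2])
--
--     return "".join(seq)
-- ===== SOURCE B (Python) =====
-- def LZW_decode_bin(code):
--     # Canonical prev-carrying LZW decode: one table holding both literals and
--     # phrases, a running `prev` instead of A's lookahead at code[elem + 1].
--     table = ['0', '1']
--     prev = table[code[0]]
--     out = [prev]
--     for c in code[1:]:
--         entry = table[c] if c < len(table) else prev + prev[0]
--         out.append(entry)
--         table.append(prev + entry[0])
--         prev = entry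
--     return "".join(out)
-- ===== Notes on version B (the rewrite author's own statement) =====
-- stated objective: simpler
-- what changed: Replaces A's index loop with lookahead at code[elem+1], a separate {0,1} char map, and an elem==0 special case by the canonical prev-carrying LZW decode over a single table seeded with the two literals; Pre_ excludes exactly the inputs on which A raises (empty code, or a code value outside 0..i+1 at position i, which hits a KeyError/IndexError).
import Mathlib
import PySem

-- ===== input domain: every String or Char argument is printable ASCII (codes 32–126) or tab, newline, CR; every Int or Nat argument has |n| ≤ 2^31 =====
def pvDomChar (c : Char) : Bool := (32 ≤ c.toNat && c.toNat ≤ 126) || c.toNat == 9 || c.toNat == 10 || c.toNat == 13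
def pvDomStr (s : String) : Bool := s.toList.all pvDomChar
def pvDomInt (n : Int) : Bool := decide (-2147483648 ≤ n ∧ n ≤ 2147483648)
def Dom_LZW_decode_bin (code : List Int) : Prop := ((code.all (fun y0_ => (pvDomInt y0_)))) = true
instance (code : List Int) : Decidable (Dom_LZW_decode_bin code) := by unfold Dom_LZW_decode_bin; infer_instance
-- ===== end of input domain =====

-- B rewrites A as the canonical prev-carrying LZW decode over one table (simpler; no lookahead,
-- no elem==0 special case); equality is proved on Pre_, which is exactly where A returns.

-- ===== PORT A =====
-- Python strings are ported as List Char ('0'/'1' digits), joined into a String at the end.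

-- chr = {0:'0',1:'1'}; [] stands for the KeyError on any other key (outside Pre_)
def pvChr (x : Int) : List Char := if x = 0 then ['0'] else if x = 1 then ['1'] else []

-- the expression `chr[v] if v <= 1 else dict_LZW[v - 2]` A writes four times;
-- pyGetD's default [] is the IndexError case (outside Pre_)
def pvDecA (d : List (List Char)) (x : Int) : List Char :=
  if x ≤ 1 then pvChr x else PySem.List.pyGetD d (x - 2) []

-- s[0] as a one-character string; [] is the IndexError on an empty string (unreachable under Pre_)
def pvFirst (s : List Char) : List Char :=
  match PySem.List.pyGet? s 0 with
  | some c => [c]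
  | none => []

-- `for elem in range(len(code) - 1)` carrying (dict_LZW, seq); fuel = number of remaining iterations
def pvLoopA (code : List Int) (elem fuel : Nat) (dictL seq : List (List Char)) :
    List (List Char) × List (List Char) :=
  match fuel with
  | 0 => (dictL, seq)
  | f + 1 =>
    let ce := PySem.List.pyGetD code (elem : Int) 0
    let cn := PySem.List.pyGetD code ((elem : Int) + 1) 0
    let c1 := pvDecA dictL ce
    let c2 :=
      if elem = 0 ∧ 1 < cn then pvDecA dictL ce
      else if cn - 2 < (dictL.length : Int) ∨ cn ≤ 1 then pvDecA dictL cn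
      else c1
    pvLoopA code (elem + 1) f (dictL ++ [c1 ++ pvFirst c2]) (seq ++ [c1])

def LZW_decode_bin (code : List Int) : String :=
  let p := pvLoopA code 0 (code.length - 1) [] []
  String.ofList (PySem.Chars.join []
    (p.2 ++ [pvDecA p.1 (PySem.List.pyGetD code (-1) 0)]))

-- ===== PORT B =====

-- `for c in code[1:]` carrying (table, prev, out)
def pvLoopB (rest : List Int) (table : List (List Char)) (prev : List Char)
    (out : List (List Char)) : List (List Char) :=
  match rest with
  | [] => out
  | c :: r =>
    let entry := if c < (table.length : Int) then PySem.List.pyGetD table c []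
                 else prev ++ pvFirst prev
    pvLoopB r (table ++ [prev ++ pvFirst entry]) entry (out ++ [entry])

def LZW_decode_bin_alt (code : List Int) : String :=
  let table : List (List Char) := [['0'], ['1']]
  let prev := PySem.List.pyGetD table (PySem.List.pyGetD code 0 0) []
  String.ofList (PySem.Chars.join []
    (pvLoopB (PySem.List.slice code (some 1) none) table prev [prev]))

-- ===== PRECONDITION & SPEC =====
-- Exactly the inputs on which the Python A returns: nonempty, and each code[i] is 0, 1 or a
-- reference no further than the next free dictionary slot (else A raises KeyError/IndexError).
def Pre_LZW_decode_bin (code : List Int) : Prop :=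
  code ≠ [] ∧ ∀ i, i < code.length → 0 ≤ code.getD i 0 ∧ code.getD i 0 ≤ (i : Int) + 1
instance (code : List Int) : Decidable (Pre_LZW_decode_bin code) := by
  unfold Pre_LZW_decode_bin; infer_instance

def pvWitness_LZW_decode_bin : List Int := [0, 1, 2, 3, 0, 4]

def Spec_LZW_decode_bin (code : List Int) (out : String) : Prop := out = LZW_decode_bin_alt code
instance (code : List Int) (out : String) : Decidable (Spec_LZW_decode_bin code out) := by
  unfold Spec_LZW_decode_bin; infer_instance

-- ===== CLAIM (what is proved, stated in full; the proofs are below) =====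
def Claim_equal_LZW_decode_bin : Prop := ∀ (code : List Int), Dom_LZW_decode_bin code →
  Pre_LZW_decode_bin code → Spec_LZW_decode_bin code (LZW_decode_bin code)

-- ===== LEMMAS AND PROOFS =====

theorem pvWitness_ok :
    Dom_LZW_decode_bin pvWitness_LZW_decode_bin ∧ Pre_LZW_decode_bin pvWitness_LZW_decode_bin := by
  constructor <;> decide

-- first char of (prev ++ first char of prev) is the first char of prev
theorem pvFirst_append_pvFirst (s : List Char) : pvFirst (s ++ pvFirst s) = pvFirst s := by
  cases s with
  | nil => rfl
  | cons a t => simp [pvFirst, PySem.List.pyGet?_zero_cons, List.cons_append]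

-- indexing the seeded table at 0 or 1 is the chr map
theorem pvTable_small (d : List (List Char)) (x : Int) (h0 : 0 ≤ x) (h1 : x ≤ 1) :
    PySem.List.pyGetD ([['0'], ['1']] ++ d) x [] = pvChr x := by
  interval_cases x
  · rw [show ([['0'], ['1']] ++ d : List (List Char)) = ['0'] :: (['1'] :: d) from rfl,
      PySem.List.pyGetD_zero_cons]; rfl
  · rw [show ((1 : Int)) = ((1 : Nat) : Int) from rfl, PySem.List.pyGetD_natCast]; rfl

-- indexing the seeded table at x ≥ 2 is indexing the grown dictionary at x - 2
theorem pvTable_mid (t0 t1 : List Char) (d : List (List Char)) (x : Int) (h : 2 ≤ x) :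
    PySem.List.pyGetD (t0 :: t1 :: d) x [] = PySem.List.pyGetD d (x - 2) [] := by
  obtain ⟨k, rfl⟩ : ∃ k : Nat, x = (k : Int) + 2 := ⟨(x - 2).toNat, by omega⟩
  have h2 : ((k : Int) + 2) = ((k + 2 : Nat) : Int) := by push_cast; ring
  rw [h2, PySem.List.pyGetD_natCast]
  simp [List.getD]

-- appending an entry does not change lookups strictly below the old length
theorem pvGetD_append_lt (d : List (List Char)) (x : List Char) (i : Int)
    (h0 : 0 ≤ i) (h : i < (d.length : Int)) :
    PySem.List.pyGetD (d ++ [x]) i [] = PySem.List.pyGetD d i [] := by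
  obtain ⟨k, rfl⟩ : ∃ k : Nat, i = (k : Int) := ⟨i.toNat, by omega⟩
  rw [PySem.List.pyGetD_natCast, PySem.List.pyGetD_natCast]
  have hk : k < d.length := by exact_mod_cast h
  simp [List.getD, List.getElem?_append_left hk]

-- the freshly appended entry is found at index (length of the old dictionary)
theorem pvGetD_append_self (d : List (List Char)) (x : List Char) :
    PySem.List.pyGetD (d ++ [x]) (d.length : Int) [] = x := by
  rw [PySem.List.pyGetD_natCast]
  simp [List.getD]

-- code[-1] is code.getD (len - 1)
theorem pvGetD_neg_one (code : List Int) (h : code ≠ []) :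
    PySem.List.pyGetD code (-1) 0 = code.getD (code.length - 1) 0 := by
  rw [PySem.List.pyGetD_neg_ofNat code 1 0 (by omega)
    (by have := List.length_pos_iff.mpr h; omega)]
  rw [List.getD_eq_getElem _ _ (by have := List.length_pos_iff.mpr h; omega)]

-- MAIN INVARIANT: from any aligned pair of states, A's remaining loop (plus its final append)
-- produces the same sequence as B's remaining loop.
theorem pvLoop_eq (code : List Int)
    (hpre : ∀ i, i < code.length → 0 ≤ code.getD i 0 ∧ code.getD i 0 ≤ (i : Int) + 1) :
    ∀ (fuel elem : Nat) (d s : List (List Char)) (prev : List Char),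
      elem + fuel + 1 = code.length →
      d.length = elem →
      prev = pvDecA d (code.getD elem 0) →
      (pvLoopA code elem fuel d s).2 ++
        [pvDecA (pvLoopA code elem fuel d s).1 (PySem.List.pyGetD code (-1) 0)]
      = pvLoopB (code.drop (elem + 1)) ([['0'], ['1']] ++ d) prev (s ++ [prev]) := by
  intro fuel
  induction fuel with
  | zero =>
    intro elem d s prev hlen hd hprev
    have hne : code ≠ [] := by intro h; simp [h] at hlen
    have hdrop : code.drop (elem + 1) = [] := List.drop_eq_nil_of_le (by omega)
    rw [hdrop]
    simp only [pvLoopA, pvLoopB]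
    rw [pvGetD_neg_one code hne]
    have hl : code.length - 1 = elem := by omega
    rw [hl, ← hprev]
  | succ f ih =>
    intro elem d s prev hlen hd hprev
    have helem1 : elem + 1 < code.length := by omega
    have hce : PySem.List.pyGetD code (elem : Int) 0 = code.getD elem 0 := by
      simp [PySem.List.pyGetD_natCast]
    have hcncast : ((elem : Int) + 1) = ((elem + 1 : Nat) : Int) := by push_cast; ring
    have hcn : PySem.List.pyGetD code ((elem : Int) + 1) 0 = code.getD (elem + 1) 0 := by
      rw [hcncast, PySem.List.pyGetD_natCast]
    set cn := code.getD (elem + 1) 0 with hcndef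
    have hcnb := hpre (elem + 1) helem1
    have hdrop : code.drop (elem + 1) = cn :: code.drop (elem + 1 + 1) := by
      rw [List.drop_eq_getElem_cons helem1, hcndef, List.getD_eq_getElem _ _ helem1]
    simp only [pvLoopA, hce, hcn, ← hprev]
    rw [hdrop]
    simp only [pvLoopB]
    have htlen : ((([['0'], ['1']] : List (List Char)) ++ d).length : Int) = (elem : Int) + 2 := by
      simp only [List.length_append, List.length_cons, List.length_nil, hd]; omega
    rw [htlen]
    rcases (by omega : cn ≤ 1 ∨ (2 ≤ cn ∧ cn ≤ (elem : Int) + 1) ∨ cn = (elem : Int) + 2) with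
      h1 | h2 | h3
    · -- cn is a literal 0/1
      rw [if_neg (show ¬ (elem = 0 ∧ 1 < cn) by rintro ⟨_, hc⟩; omega),
        if_pos (show cn - 2 < (d.length : Int) ∨ cn ≤ 1 from Or.inr h1),
        if_pos (show cn < (elem : Int) + 2 by omega)]
      have hE : PySem.List.pyGetD ([['0'], ['1']] ++ d) cn [] = pvDecA d cn := by
        rw [pvTable_small d cn hcnb.1 h1]; simp [pvDecA, h1]
      rw [hE, List.append_assoc]
      refine ih _ _ _ _ (by omega) (by simp [hd]) ?_
      simp only [pvDecA]
      rw [← hcndef]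
      simp only [if_pos h1]
    · -- cn refers to an existing dictionary entry
      rw [if_neg (show ¬ (elem = 0 ∧ 1 < cn) by rintro ⟨he, _⟩; subst he; omega),
        if_pos (show cn - 2 < (d.length : Int) ∨ cn ≤ 1 from Or.inl (by rw [hd]; omega)),
        if_pos (show cn < (elem : Int) + 2 by omega)]
      have hE : PySem.List.pyGetD ([['0'], ['1']] ++ d) cn [] = pvDecA d cn := by
        rw [show ([['0'], ['1']] ++ d : List (List Char)) = ['0'] :: ['1'] :: d from rfl,
          pvTable_mid _ _ _ _ h2.1]
        simp [pvDecA, show ¬ cn ≤ 1 by omega]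
      rw [hE, List.append_assoc]
      refine ih _ _ _ _ (by omega) (by simp [hd]) ?_
      simp only [pvDecA]
      rw [← hcndef]
      simp only [if_neg (show ¬ cn ≤ 1 by omega)]
      rw [pvGetD_append_lt _ _ _ (by omega) (by rw [hd]; omega)]
    · -- KwKwK: cn is the next free slot
      by_cases h0 : elem = 0
      · rw [if_pos (show elem = 0 ∧ 1 < cn from ⟨h0, by omega⟩),
          if_neg (show ¬ cn < (elem : Int) + 2 by omega)]
        rw [pvFirst_append_pvFirst, List.append_assoc]
        refine ih _ _ _ _ (by omega) (by simp [hd]) ?_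
        simp only [pvDecA]
        rw [← hcndef, if_neg (show ¬ cn ≤ 1 by omega),
          show cn - 2 = ((d.length : Nat) : Int) by rw [hd]; omega, pvGetD_append_self]
      · rw [if_neg (show ¬ (elem = 0 ∧ 1 < cn) by rintro ⟨he, _⟩; exact h0 he),
          if_neg (show ¬ (cn - 2 < (d.length : Int) ∨ cn ≤ 1) by rw [hd]; omega),
          if_neg (show ¬ cn < (elem : Int) + 2 by omega)]
        rw [pvFirst_append_pvFirst, List.append_assoc]
        refine ih _ _ _ _ (by omega) (by simp [hd]) ?_
        simp only [pvDecA]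
        rw [← hcndef, if_neg (show ¬ cn ≤ 1 by omega),
          show cn - 2 = ((d.length : Nat) : Int) by rw [hd]; omega, pvGetD_append_self]

-- ===== VERDICT (by name: the statement is the Claim_ definition above) =====
theorem LZW_decode_bin_spec : Claim_equal_LZW_decode_bin := by
  intro code _ hpre
  obtain ⟨hne, hb⟩ := hpre
  unfold Spec_LZW_decode_bin LZW_decode_bin LZW_decode_bin_alt
  have hlen : 0 < code.length := List.length_pos_iff.mpr hne
  have hc0 : PySem.List.pyGetD code 0 0 = code.getD 0 0 := by
    simpa using PySem.List.pyGetD_natCast code 0 0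
  have hb0 := hb 0 hlen
  have hb01 : code.getD 0 0 ≤ 1 := by have := hb0.2; omega
  have hprev : PySem.List.pyGetD [['0'], ['1']] (PySem.List.pyGetD code 0 0) []
      = pvDecA [] (code.getD 0 0) := by
    rw [hc0]
    have := pvTable_small [] (code.getD 0 0) hb0.1 hb01
    simp only [List.append_nil] at this
    rw [this]
    simp only [pvDecA]
    rw [if_pos hb01]
  have hslice : PySem.List.slice code (some 1) none = code.drop 1 := by
    rw [PySem.List.slice_from_one, List.drop_one]
  simp only [hslice, hprev]
  have hmain := pvLoop_eq code hb (code.length - 1) 0 [] [] (pvDecA [] (code.getD 0 0))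
    (by omega) rfl rfl
  simp only [List.nil_append, List.append_nil, Nat.zero_add] at hmain
  rw [hmain]
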